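-- pv_equiv track=rewrite | github.com/xutong0258/windbg | base/helper.py | get_list_text_line_last_index
-- ===== SOURCE A (Python) =====
-- def get_list_text_line_last_index(input_list, text):
--     index = None
--     if input_list is None:
--         return index
--
--     for idx, line in enumerate(input_list):
--         if text in line:
--             index = idx
--     return index
-- ===== SOURCE B (Python) =====
-- def get_list_text_line_last_index(input_list, text):
--     if input_list is None:
--         return None
--     for idx in range(len(input_list) - 1, -1, -1):
--         if text in input_list[idx]:
--             return idx
--     return None
-- ===== Notes on version B (the rewrite author's own statement) =====
-- stated objective: alternative
-- what changed: Replaces the forward scan that keeps overwriting a 'last seen' index with a reverse scan that returns the first (highest) matching index and short-circuits, maintaining no accumulator.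
import Mathlib
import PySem

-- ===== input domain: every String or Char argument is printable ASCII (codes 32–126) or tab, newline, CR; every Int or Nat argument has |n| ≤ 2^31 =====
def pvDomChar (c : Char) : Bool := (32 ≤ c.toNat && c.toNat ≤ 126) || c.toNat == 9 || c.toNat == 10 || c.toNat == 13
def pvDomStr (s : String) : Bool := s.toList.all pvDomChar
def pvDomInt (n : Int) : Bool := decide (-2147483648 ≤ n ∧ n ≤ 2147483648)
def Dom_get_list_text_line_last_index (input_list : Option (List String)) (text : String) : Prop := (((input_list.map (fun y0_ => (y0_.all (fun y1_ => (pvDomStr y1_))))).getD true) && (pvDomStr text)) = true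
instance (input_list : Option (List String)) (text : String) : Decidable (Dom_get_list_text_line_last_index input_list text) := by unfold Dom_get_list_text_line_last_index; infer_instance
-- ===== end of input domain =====

-- ===== PORT A =====
-- A: forward scan over enumerate, overwriting the last matching index.
def get_list_text_line_last_index (input_list : Option (List String)) (text : String) : Option Int :=
  match input_list with
  | none => none
  | some xs =>
      (PySem.List.enumerate xs 0).foldl
        (fun index p => if PySem.Str.isIn text p.2 then some p.1 else index) none

-- ===== PORT B =====
-- B: reverse index loop 'for idx in range(len-1, -1, -1)', early return on first match.
def altGo (xs : List String) (text : String) : Nat → Option Int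
  | 0 => none
  | n + 1 => if PySem.Str.isIn text (xs.getD n "") then some (n : Int) else altGo xs text n

def get_list_text_line_last_index_alt (input_list : Option (List String)) (text : String) : Option Int :=
  match input_list with
  | none => none
  | some xs => altGo xs text xs.length

-- ===== PRECONDITION & SPEC =====
def Spec_get_list_text_line_last_index (input_list : Option (List String)) (text : String) (out : Option Int) : Prop := out = get_list_text_line_last_index_alt input_list text
instance (input_list : Option (List String)) (text : String) (out : Option Int) : Decidable (Spec_get_list_text_line_last_index input_list text out) := by unfold Spec_get_list_text_line_last_index; infer_instance

-- ===== CLAIM (what is proved, stated in full; the proofs are below) =====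
def Claim_equal_get_list_text_line_last_index : Prop := ∀ (input_list : Option (List String)) (text : String), Dom_get_list_text_line_last_index input_list text → Spec_get_list_text_line_last_index input_list text (get_list_text_line_last_index input_list text)

-- ===== LEMMAS AND PROOFS =====

-- ===== VERDICT (by name: the statement is the Claim_ definition above) =====
lemma altGo_append (xs : List String) (x : String) (text : String) (n : Nat) (h : n ≤ xs.length) :
    altGo (xs ++ [x]) text n = altGo xs text n := by
  induction n with
  | zero => rfl
  | succ k ih =>
      have hk : k < xs.length := h
      have hget : (xs ++ [x])[k]? = xs[k]? := List.getElem?_append_left hk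
      simp [altGo, List.getD, hget, ih (Nat.le_of_lt hk)]

lemma fold_eq_altGo (xs : List String) (text : String) :
    (PySem.List.enumerate xs 0).foldl
      (fun index p => if PySem.Str.isIn text p.2 then some p.1 else index) none
    = altGo xs text xs.length := by
  induction xs using List.reverseRecOn with
  | nil => rfl
  | append_singleton xs x ih =>
      rw [PySem.List.enumerate_append, List.foldl_append, ih]
      simp [PySem.List.enumerate, altGo, List.getD,
        altGo_append xs x text xs.length (le_refl _)]

theorem get_list_text_line_last_index_spec : Claim_equal_get_list_text_line_last_index := by
  intro input_list text _
  unfold Spec_get_list_text_line_last_index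
  cases input_list with
  | none => rfl
  | some xs =>
      simpa [get_list_text_line_last_index, get_list_text_line_last_index_alt]
        using fold_eq_altGo xs text
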